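-- pv_equiv track=rewrite | github.com/jfvitas/bio-agent-lab | src/pbdata/sources/rcsb_classify.py | detect_membrane_context
-- ===== SOURCE A (Python) =====
-- from typing import Any
--
-- _MEMBRANE_KEYWORDS: tuple[str, ...] = (
--     "membrane protein",
--     "transmembrane",
--     "gpcr",
--     "g protein-coupled",
--     "ion channel",
--     "transporter",
--     "receptor tyrosine kinase",
--     "integrin",
--     "aquaporin",
--     "abc transporter",
--     "membrane receptor",
--     "lipid bilayer",
--     "detergent",
--     "micelle",
--     # Photosynthetic membrane complexes (thylakoid-embedded)
--     "photosystem",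
--     "thylakoid",
--     "photosynthesis",
--     "light harvesting",
--     # DHHC-family palmitoyltransferases and lipid-modifying enzymes
--     "dhhc",
--     "palmitoyl",
--     "palmitoyltransferase",
--     # Other common membrane-embedded enzyme families
--     "cytochrome bc1",
--     "cytochrome c oxidase",
--     "nadh dehydrogenase",
--     "atp synthase",
-- )
--
-- def detect_membrane_context(raw_entry: dict[str, Any]) -> bool:
--     """Return True if struct_keywords suggest a membrane-protein context.
--
--     Checks pdbx_keywords and the free-text keywords field for membrane-
--     related terms (case-insensitive substring match).  This is heuristic:
--     a positive result means the flag should be set; a negative does NOT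
--     guarantee the protein is soluble.
--     """
--     kw_block = raw_entry.get("struct_keywords") or {}
--     fields = [
--         (kw_block.get("pdbx_keywords") or "").lower(),
--         (kw_block.get("text") or "").lower(),
--     ]
--     for field in fields:
--         for kw in _MEMBRANE_KEYWORDS:
--             if kw in field:
--                 return True
--     return False
-- ===== SOURCE B (Python) =====
-- # B: single left-to-right scan of the joined, lowered text, checking at each
-- # position only the keywords bucketed by first character (position-major scan
-- # with a precomputed first-char index) instead of A's per-keyword substring
-- # searches. Return value identical to A's.
-- _MEMBRANE_KEYWORDS: tuple[str, ...] = (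
--     "membrane protein",
--     "transmembrane",
--     "gpcr",
--     "g protein-coupled",
--     "ion channel",
--     "transporter",
--     "receptor tyrosine kinase",
--     "integrin",
--     "aquaporin",
--     "abc transporter",
--     "membrane receptor",
--     "lipid bilayer",
--     "detergent",
--     "micelle",
--     "photosystem",
--     "thylakoid",
--     "photosynthesis",
--     "light harvesting",
--     "dhhc",
--     "palmitoyl",
--     "palmitoyltransferase",
--     "cytochrome bc1",
--     "cytochrome c oxidase",
--     "nadh dehydrogenase",
--     "atp synthase",
-- )
--
-- # first-char index, built once at import time
-- _BY_FIRST: dict[str, list[str]] = {}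
-- for _kw in _MEMBRANE_KEYWORDS:
--     _BY_FIRST.setdefault(_kw[0], []).append(_kw)
--
--
-- def detect_membrane_context(raw_entry):
--     kw_block = raw_entry.get("struct_keywords") or {}
--     # no keyword contains "\n", so joining the two fields with "\n" cannot
--     # create or destroy a match
--     text = ((kw_block.get("pdbx_keywords") or "")
--             + "\n"
--             + (kw_block.get("text") or "")).lower()
--     for i, ch in enumerate(text):
--         for kw in _BY_FIRST.get(ch, ()):
--             if text.startswith(kw, i):
--                 return True
--     return False
-- ===== Notes on version B (the rewrite author's own statement) =====
-- stated objective: alternative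
-- what changed: A runs a separate substring search over each field for every keyword; B joins the two fields once and makes a single position-major scan, consulting a first-character index of the keywords at each position.
import Mathlib
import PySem

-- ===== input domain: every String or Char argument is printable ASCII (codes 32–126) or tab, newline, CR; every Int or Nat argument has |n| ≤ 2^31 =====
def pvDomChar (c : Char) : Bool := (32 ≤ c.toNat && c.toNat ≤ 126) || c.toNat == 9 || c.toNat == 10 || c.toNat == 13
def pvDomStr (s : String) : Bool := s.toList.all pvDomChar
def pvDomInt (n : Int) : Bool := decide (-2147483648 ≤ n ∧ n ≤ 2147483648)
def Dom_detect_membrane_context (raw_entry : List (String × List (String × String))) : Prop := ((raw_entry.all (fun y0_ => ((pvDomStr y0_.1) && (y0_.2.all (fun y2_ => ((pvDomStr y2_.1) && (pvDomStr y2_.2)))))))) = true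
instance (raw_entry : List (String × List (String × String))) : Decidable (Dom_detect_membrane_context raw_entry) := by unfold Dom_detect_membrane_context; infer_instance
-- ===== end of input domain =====

-- B replaces A's per-keyword substring searches over each field by one position-major
-- scan of the joined, lowered text with a first-character keyword index (objective:
-- alternative algorithm, same result).

-- _MEMBRANE_KEYWORDS (module constant shared by both sources)
def pvKW : List String :=
  ["membrane protein", "transmembrane", "gpcr", "g protein-coupled", "ion channel",
   "transporter", "receptor tyrosine kinase", "integrin", "aquaporin", "abc transporter",
   "membrane receptor", "lipid bilayer", "detergent", "micelle", "photosystem",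
   "thylakoid", "photosynthesis", "light harvesting", "dhhc", "palmitoyl",
   "palmitoyltransferase", "cytochrome bc1", "cytochrome c oxidase", "nadh dehydrogenase",
   "atp synthase"]

-- ===== PORT A =====
-- dict.get = first match in the association list; 'or {}' / 'or ""' = default on missing/empty
def detect_membrane_context (raw_entry : List (String × List (String × String))) : Bool :=
  let kw_block := (List.lookup "struct_keywords" raw_entry).getD []
  let fields : List String :=
    [PySem.Str.lower ((List.lookup "pdbx_keywords" kw_block).getD ""),
     PySem.Str.lower ((List.lookup "text" kw_block).getD "")]
  fields.any (fun field => pvKW.any (fun kw => PySem.Str.isIn kw field))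

-- ===== PORT B =====
-- _BY_FIRST.get(ch, ()): the keywords whose first character is ch, in tuple order
def pvBucket (c : Char) : List String :=
  pvKW.filter (fun kw => kw.toList.head? == some c)

-- the position-major scan: at each position try text.startswith(kw, i) for the bucket of text[i]
def pvScan : List Char → Bool
  | [] => false
  | c :: rest => (pvBucket c).any (fun kw => kw.toList.isPrefixOf (c :: rest)) || pvScan rest

def detect_membrane_context_alt (raw_entry : List (String × List (String × String))) : Bool :=
  let kw_block := (List.lookup "struct_keywords" raw_entry).getD []
  let txt : List Char :=
    ((List.lookup "pdbx_keywords" kw_block).getD "").toList ++ '\n' ::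
    ((List.lookup "text" kw_block).getD "").toList
  pvScan (PySem.Chars.lower txt)

-- ===== PRECONDITION & SPEC =====
def Spec_detect_membrane_context (raw_entry : List (String × List (String × String))) (out : Bool) : Prop := out = detect_membrane_context_alt raw_entry
instance (raw_entry : List (String × List (String × String))) (out : Bool) : Decidable (Spec_detect_membrane_context raw_entry out) := by unfold Spec_detect_membrane_context; infer_instance

-- ===== CLAIM (what is proved, stated in full; the proofs are below) =====
def Claim_equal_detect_membrane_context : Prop := ∀ (raw_entry : List (String × List (String × String))), Dom_detect_membrane_context raw_entry → Spec_detect_membrane_context raw_entry (detect_membrane_context raw_entry)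

-- ===== LEMMAS AND PROOFS =====

-- every keyword is nonempty and contains no newline
theorem pvKW_ok : ∀ kw ∈ pvKW, kw.toList ≠ [] ∧ '\n' ∉ kw.toList := by decide

-- a prefix of a ++ '\n' :: b that avoids '\n' is a prefix of a
theorem pv_prefix_sep {k a b : List Char} (hk : '\n' ∉ k)
    (h : k <+: a ++ '\n' :: b) : k <+: a := by
  induction a generalizing k with
  | nil =>
    cases k with
    | nil => exact List.nil_prefix
    | cons y k' =>
      exfalso
      rcases (List.cons_prefix_cons).mp h with ⟨rfl, _⟩
      exact hk (List.mem_cons_self)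
  | cons x a' ih =>
    cases k with
    | nil => exact List.nil_prefix
    | cons y k' =>
      rcases (List.cons_prefix_cons).mp h with ⟨rfl, h'⟩
      have hk' : '\n' ∉ k' := fun m => hk (List.mem_cons_of_mem _ m)
      exact (List.cons_prefix_cons).mpr ⟨rfl, ih hk' h'⟩

-- a newline-free word is infix of a ++ '\n' :: b iff it is infix of a or of b
theorem pv_sep_split {k : List Char} (a b : List Char) (hk : '\n' ∉ k) :
    k <:+: a ++ '\n' :: b ↔ (k <:+: a ∨ k <:+: b) := by
  induction a with
  | nil =>
    simp only [List.nil_append, List.infix_cons_iff, List.infix_nil]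
    constructor
    · rintro (hp | hb)
      · have := pv_prefix_sep (a := []) (b := b) hk hp
        exact Or.inl (List.prefix_nil.mp this)
      · exact Or.inr hb
    · rintro (rfl | hb)
      · exact Or.inl List.nil_prefix
      · exact Or.inr hb
  | cons x a' ih =>
    simp only [List.cons_append, List.infix_cons_iff] at *
    constructor
    · rintro (hp | hi)
      · exact Or.inl (Or.inl (pv_prefix_sep hk hp))
      · rcases ih.mp hi with h | h
        · exact Or.inl (Or.inr h)
        · exact Or.inr h
    · rintro ((hp | hi) | hb)
      · exact Or.inl (hp.trans (List.prefix_append _ _))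
      · exact Or.inr (ih.mpr (Or.inl hi))
      · exact Or.inr (ih.mpr (Or.inr hb))

-- the bucketed position-major scan finds exactly the keywords occurring as substrings
theorem pvScan_spec (s : List Char) :
    pvScan s = pvKW.any (fun kw => PySem.Chars.isIn kw.toList s) := by
  induction s with
  | nil => decide
  | cons c rest ih =>
    rw [pvScan, ih]
    apply Bool.eq_iff_iff.mpr
    simp only [Bool.or_eq_true, List.any_eq_true, PySem.Chars.isIn_iff_infix,
      List.infix_cons_iff, pvBucket, List.mem_filter, List.isPrefixOf_iff_prefix,
      beq_iff_eq]
    constructor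
    · rintro (⟨kw, ⟨hm, _⟩, hp⟩ | ⟨kw, hm, hi⟩)
      · exact ⟨kw, hm, Or.inl hp⟩
      · exact ⟨kw, hm, Or.inr hi⟩
    · rintro ⟨kw, hm, hp | hi⟩
      · left
        refine ⟨kw, ⟨hm, ?_⟩, hp⟩
        rcases hne : kw.toList with _ | ⟨y, t⟩
        · exact absurd hne (pvKW_ok kw hm).1
        · rw [hne] at hp
          rcases (List.cons_prefix_cons).mp hp with ⟨rfl, _⟩
          simp
      · exact Or.inr ⟨kw, hm, hi⟩

-- ===== VERDICT (by name: the statement is the Claim_ definition above) =====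
theorem detect_membrane_context_spec : Claim_equal_detect_membrane_context := by
  intro raw_entry _
  unfold Spec_detect_membrane_context detect_membrane_context detect_membrane_context_alt
  dsimp only
  set kb := (List.lookup "struct_keywords" raw_entry).getD [] with hkb
  set p := (List.lookup "pdbx_keywords" kb).getD "" with hp
  set t := (List.lookup "text" kb).getD "" with ht
  have hjoin : PySem.Chars.lower (p.toList ++ '\n' :: t.toList)
      = PySem.Chars.lower p.toList ++ '\n' :: PySem.Chars.lower t.toList := by
    simp only [PySem.Chars.lower, List.map_append, List.map_cons,
      show PySem.Chars.lowerChar '\n' = '\n' from by decide]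
  rw [hjoin, pvScan_spec]
  apply Bool.eq_iff_iff.mpr
  simp only [List.any_cons, List.any_nil, Bool.or_false, Bool.or_eq_true,
    List.any_eq_true, PySem.Str.isIn_iff_infix, PySem.Str.toList_lower,
    PySem.Chars.isIn_iff_infix]
  constructor
  · rintro (⟨kw, hm, hi⟩ | ⟨kw, hm, hi⟩)
    · exact ⟨kw, hm, (pv_sep_split _ _ (pvKW_ok kw hm).2).mpr (Or.inl hi)⟩
    · exact ⟨kw, hm, (pv_sep_split _ _ (pvKW_ok kw hm).2).mpr (Or.inr hi)⟩
  · rintro ⟨kw, hm, hi⟩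
    rcases (pv_sep_split _ _ (pvKW_ok kw hm).2).mp hi with h | h
    · exact Or.inl ⟨kw, hm, h⟩
    · exact Or.inr ⟨kw, hm, h⟩
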